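-- pv_equiv track=rewrite | github.com/oguzhan1998eroglu/a_star | a_star.py | left_is_valid
-- ===== SOURCE A (Python) =====
-- def is_valid(index, row_size, column_size):
--     return (index[0] >= 0 and index[1] >= 0) and (index[0] < row_size and index[1] < column_size)
--
-- def left_is_valid(map, boundary, row_size, column_size):
--     starting_point = boundary[0]
--     finishing_point = boundary[1]
--     left_is_v = True
--     size = abs(starting_point[0] - finishing_point[0]) + 1
--     for i in range(size):
--         if not is_valid([starting_point[0]+i, starting_point[1]-1], row_size, column_size):
--             left_is_v = False
--     left_is_zero = True
--     if left_is_v: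
--         for i in range(size):
--             if map[boundary[0][0]+i][boundary[0][1]-1] != 0:
--                 left_is_zero = False
--     return left_is_zero and left_is_v
-- ===== SOURCE B (Python) =====
-- def left_is_valid(map, boundary, row_size, column_size):
--     top = boundary[0][0]
--     col = boundary[0][1] - 1
--     size = abs(top - boundary[1][0]) + 1
--     bounds_ok = 0 <= top and top + size <= row_size and 0 <= col < column_size
--     column = {row[col] for row in map[top:top + size]} if bounds_ok else set()
--     return bounds_ok and column <= {0}
-- ===== Notes on version B (the rewrite author's own statement) =====
-- stated objective: alternative
-- what changed: Instead of A's two index loops with boolean flags, B slices the map rows (map[top:top+size]), collects the set of distinct values found in the target column of that slice, and answers by an endpoint bounds guard plus a subset test against {0}; no range(size) loop or per-cell validity check remains.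
import Mathlib
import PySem

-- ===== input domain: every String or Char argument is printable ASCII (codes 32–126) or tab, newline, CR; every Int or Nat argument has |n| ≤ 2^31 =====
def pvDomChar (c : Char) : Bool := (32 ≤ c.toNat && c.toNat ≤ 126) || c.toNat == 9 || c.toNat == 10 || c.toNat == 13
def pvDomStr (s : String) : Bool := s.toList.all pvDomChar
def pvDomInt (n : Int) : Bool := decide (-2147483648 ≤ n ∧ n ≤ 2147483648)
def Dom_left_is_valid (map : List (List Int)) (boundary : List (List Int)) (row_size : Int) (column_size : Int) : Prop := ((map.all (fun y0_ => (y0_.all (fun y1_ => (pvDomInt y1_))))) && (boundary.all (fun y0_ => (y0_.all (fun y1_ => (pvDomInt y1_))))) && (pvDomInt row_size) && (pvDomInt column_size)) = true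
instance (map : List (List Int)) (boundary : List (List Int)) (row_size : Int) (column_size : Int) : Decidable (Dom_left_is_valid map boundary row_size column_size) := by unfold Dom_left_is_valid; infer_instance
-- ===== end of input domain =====

-- B replaces A's two flag loops by slicing the map rows, collecting the set of distinct
-- values in the target column of the slice, and a bounds guard plus subset test vs {0}
-- (objective: alternative).

-- ===== PORT A =====
def is_valid_port (index : List Int) (row_size : Int) (column_size : Int) : Bool :=
  (PySem.List.pyGetD index 0 0 ≥ 0 && PySem.List.pyGetD index 1 0 ≥ 0) &&
    (PySem.List.pyGetD index 0 0 < row_size && PySem.List.pyGetD index 1 0 < column_size)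

def left_is_valid (map : List (List Int)) (boundary : List (List Int)) (row_size : Int) (column_size : Int) : Bool :=
  let starting_point := PySem.List.pyGetD boundary 0 []
  let finishing_point := PySem.List.pyGetD boundary 1 []
  let left_is_v := true
  let size := |PySem.List.pyGetD starting_point 0 0 - PySem.List.pyGetD finishing_point 0 0| + 1
  let left_is_v := (PySem.List.pyRange 0 size 1).foldl (fun acc i =>
      if !(is_valid_port [PySem.List.pyGetD starting_point 0 0 + i,
                          PySem.List.pyGetD starting_point 1 0 - 1] row_size column_size)
      then false else acc) left_is_v
  let left_is_zero := true
  let left_is_zero :=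
    if left_is_v then
      (PySem.List.pyRange 0 size 1).foldl (fun acc i =>
        if PySem.List.pyGetD
             (PySem.List.pyGetD map (PySem.List.pyGetD (PySem.List.pyGetD boundary 0 []) 0 0 + i) [])
             (PySem.List.pyGetD (PySem.List.pyGetD boundary 0 []) 1 0 - 1) 0 ≠ 0
        then false else acc) left_is_zero
    else left_is_zero
  left_is_zero && left_is_v

-- ===== PORT B =====
def left_is_valid_alt (map : List (List Int)) (boundary : List (List Int)) (row_size : Int) (column_size : Int) : Bool :=
  let top := PySem.List.pyGetD (PySem.List.pyGetD boundary 0 []) 0 0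
  let col := PySem.List.pyGetD (PySem.List.pyGetD boundary 0 []) 1 0 - 1
  let size := |top - PySem.List.pyGetD (PySem.List.pyGetD boundary 1 []) 0 0| + 1
  let bounds_ok := decide (0 ≤ top) && decide (top + size ≤ row_size) &&
                   decide (0 ≤ col) && decide (col < column_size)
  let column :=
    if bounds_ok then
      PySem.Set.ofList ((PySem.List.slice map (some top) (some (top + size))).map
        (fun row => PySem.List.pyGetD row col 0))
    else PySem.Set.empty
  bounds_ok && PySem.Set.issubset column (PySem.Set.ofList [0])

-- ===== PRECONDITION & SPEC =====
-- Pre_ excludes exactly the inputs where Python A raises: boundary lacking the accessed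
-- entries (boundary[0][0], boundary[0][1], boundary[1][0]), or — when every scanned cell
-- passes the bounds check against row_size/column_size — a map that does not actually
-- contain one of those cells (IndexError in A's second loop).
def Pre_left_is_valid (map : List (List Int)) (boundary : List (List Int)) (row_size : Int) (column_size : Int) : Prop :=
  2 ≤ boundary.length ∧ 2 ≤ (boundary.getD 0 []).length ∧ 1 ≤ (boundary.getD 1 []).length ∧
  (let r0 := (boundary.getD 0 []).getD 0 0
   let c := (boundary.getD 0 []).getD 1 0 - 1
   let size := |r0 - (boundary.getD 1 []).getD 0 0| + 1
   (0 ≤ r0 ∧ r0 + size - 1 < row_size ∧ 0 ≤ c ∧ c < column_size) →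
     ∀ n ∈ List.range size.toNat,
       (r0 + n).toNat < map.length ∧ c.toNat < (map.getD (r0 + n).toNat []).length)

instance (map : List (List Int)) (boundary : List (List Int)) (row_size : Int) (column_size : Int) : Decidable (Pre_left_is_valid map boundary row_size column_size) := by
  unfold Pre_left_is_valid; infer_instance

def pvWitness_left_is_valid : List (List Int) × List (List Int) × Int × Int :=
  ([[0], [0]], [[0, 1], [1, 1]], 2, 1)

def Spec_left_is_valid (map : List (List Int)) (boundary : List (List Int)) (row_size : Int) (column_size : Int) (out : Bool) : Prop := out = left_is_valid_alt map boundary row_size column_size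
instance (map : List (List Int)) (boundary : List (List Int)) (row_size : Int) (column_size : Int) (out : Bool) : Decidable (Spec_left_is_valid map boundary row_size column_size out) := by unfold Spec_left_is_valid; infer_instance

-- ===== CLAIM (what is proved, stated in full; the proofs are below) =====
def Claim_equal_left_is_valid : Prop := ∀ (map : List (List Int)) (boundary : List (List Int)) (row_size : Int) (column_size : Int), Dom_left_is_valid map boundary row_size column_size → Pre_left_is_valid map boundary row_size column_size → Spec_left_is_valid map boundary row_size column_size (left_is_valid map boundary row_size column_size)

-- ===== LEMMAS AND PROOFS =====

-- A loop 'if p i then flag := False' over a list is the conjunction of ¬ p over the list.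
theorem foldl_flag_false (p : Int → Prop) [DecidablePred p] (L : List Int) (acc : Bool) :
    L.foldl (fun a i => if p i then false else a) acc = (acc && L.all (fun i => decide ¬ p i)) := by
  induction L generalizing acc with
  | nil => simp
  | cons x xs ih =>
    simp only [List.foldl_cons, List.all_cons, ih]
    by_cases h : p x <;> simp [h]

-- ===== VERDICT (by name: the statement is the Claim_ definition above) =====
theorem left_is_valid_spec : Claim_equal_left_is_valid := by
  intro map boundary row_size column_size _ hpre
  obtain ⟨hb, hb0, hb1, hmap⟩ := hpre
  unfold Spec_left_is_valid left_is_valid left_is_valid_alt is_valid_port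
  simp only []
  set r0 := PySem.List.pyGetD (PySem.List.pyGetD boundary 0 []) 0 0 with hr0
  set c1 := PySem.List.pyGetD (PySem.List.pyGetD boundary 0 []) 1 0 with hc1
  set f0 := PySem.List.pyGetD (PySem.List.pyGetD boundary 1 []) 0 0 with hf0
  set size := |r0 - f0| + 1 with hsize
  have hs1 : 1 ≤ size := by have := abs_nonneg (r0 - f0); omega
  have hg0 : ∀ i : Int, PySem.List.pyGetD [r0 + i, c1 - 1] 0 0 = r0 + i := by
    intro i; simp [PySem.List.pyGetD, PySem.List.pyGet?, PySem.List.pyIdx?]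
  have hg1 : ∀ i : Int, PySem.List.pyGetD [r0 + i, c1 - 1] 1 0 = c1 - 1 := by
    intro i; simp [PySem.List.pyGetD, PySem.List.pyGet?, PySem.List.pyIdx?]
  -- A's validity loop returns true exactly when the endpoint bounds check passes
  have hvalid_iff :
      ((PySem.List.pyRange 0 size 1).foldl (fun acc i =>
        if !((PySem.List.pyGetD [r0 + i, c1 - 1] 0 0 ≥ 0 && PySem.List.pyGetD [r0 + i, c1 - 1] 1 0 ≥ 0) &&
             (PySem.List.pyGetD [r0 + i, c1 - 1] 0 0 < row_size && PySem.List.pyGetD [r0 + i, c1 - 1] 1 0 < column_size))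
        then false else acc) true) = true
      ↔ (0 ≤ r0 ∧ r0 + size - 1 < row_size ∧ 0 ≤ c1 - 1 ∧ c1 - 1 < column_size) := by
    rw [foldl_flag_false]
    simp only [Bool.true_and, List.all_eq_true, decide_eq_true_eq]
    constructor
    · intro h
      have h0 := h 0 (by rw [PySem.List.mem_pyRange_one]; omega)
      have hL := h (size - 1) (by rw [PySem.List.mem_pyRange_one]; omega)
      simp only [hg0, hg1, Bool.not_eq_true', Bool.not_eq_false, Bool.and_eq_true,
        decide_eq_true_eq, ge_iff_le] at h0 hL
      omega
    · intro h i hi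
      rw [PySem.List.mem_pyRange_one] at hi
      simp only [hg0, hg1, Bool.not_eq_true', Bool.not_eq_false, Bool.and_eq_true,
        decide_eq_true_eq, ge_iff_le]
      omega
  by_cases hbp : 0 ≤ r0 ∧ r0 + size - 1 < row_size ∧ 0 ≤ c1 - 1 ∧ c1 - 1 < column_size
  · have hv := hvalid_iff.mpr hbp
    rw [hv]
    have hguard : (decide (0 ≤ r0) && decide (r0 + size ≤ row_size) && decide (0 ≤ c1 - 1) &&
        decide (c1 - 1 < column_size)) = true := by
      simp only [Bool.and_eq_true, decide_eq_true_eq]; omega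
    rw [hguard]
    simp only [if_true, Bool.and_true, Bool.true_and]
    -- Pre_ gives actual map coverage of the scanned cells
    have hr0e : r0 = (boundary.getD 0 []).getD 0 0 := by rw [hr0]; simp [pysem]
    have hc1e : c1 = (boundary.getD 0 []).getD 1 0 := by rw [hc1]; simp [pysem]
    have hf0e : f0 = (boundary.getD 1 []).getD 0 0 := by rw [hf0]; simp [pysem]
    simp only [← hr0e, ← hc1e, ← hf0e, ← hsize] at hmap
    have hcov := hmap hbp
    obtain ⟨t, ht⟩ : ∃ t : ℕ, r0 = (t : ℤ) := ⟨r0.toNat, (Int.toNat_of_nonneg hbp.1).symm⟩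
    obtain ⟨s, hs⟩ : ∃ s : ℕ, size = (s : ℤ) := ⟨size.toNat, (Int.toNat_of_nonneg (by omega)).symm⟩
    have hs0 : 1 ≤ s := by omega
    have hcov' : ∀ j : ℕ, j < s → t + j < map.length := by
      intro j hj
      have hm : j ∈ List.range size.toNat := by rw [List.mem_range]; omega
      have := (hcov j hm).1
      rw [ht] at this
      have hc : ((t : ℤ) + (j : ℤ)).toNat = t + j := by omega
      rwa [hc] at this
    have hlen : t + s ≤ map.length := by have := hcov' (s-1) (by omega); omega
    have hL : ((map.drop t).take s).length = s := by
      rw [List.length_take, List.length_drop]; omega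
    rw [ht, hs, PySem.List.slice_natCast_add]
    rw [foldl_flag_false]
    simp only [Bool.true_and]
    rw [Bool.eq_iff_iff]
    simp only [List.all_eq_true, PySem.Set.issubset_iff, PySem.Set.mem_ofList, List.mem_map,
      PySem.List.mem_pyRange_one, decide_eq_true_eq, List.mem_singleton, not_not]
    have hcell : ∀ (j : ℕ) (hj : j < s),
        PySem.List.pyGetD map ((t : ℤ) + (j : ℤ)) [] = map[t + j]'(hcov' j hj) := by
      intro j hj
      rw [← Nat.cast_add, PySem.List.pyGetD_natCast, List.getD_eq_getElem]
    have hrow : ∀ (j : ℕ) (hj : j < s),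
        ((map.drop t).take s)[j]'(by omega) = map[t + j]'(hcov' j hj) := by
      intro j hj
      rw [List.getElem_take, List.getElem_drop]
    constructor
    · rintro h x ⟨row, hmem, rfl⟩
      rw [List.mem_iff_getElem] at hmem
      obtain ⟨j, hjlt, hrowj⟩ := hmem
      have hjs : j < s := by omega
      have := h (j : ℤ) (by constructor <;> [positivity; exact_mod_cast hjs])
      rw [hcell j hjs] at this
      rw [← hrowj, hrow j hjs]
      exact this
    · intro h i hi
      obtain ⟨hi0, his⟩ := hi
      obtain ⟨j, rfl⟩ : ∃ j : ℕ, i = (j : ℤ) := ⟨i.toNat, (Int.toNat_of_nonneg hi0).symm⟩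
      have hjs : j < s := by exact_mod_cast his
      rw [hcell j hjs]
      exact h _ ⟨((map.drop t).take s)[j]'(by omega), List.getElem_mem _, by rw [hrow j hjs]⟩
  · have hv : ((PySem.List.pyRange 0 size 1).foldl (fun acc i =>
        if !((PySem.List.pyGetD [r0 + i, c1 - 1] 0 0 ≥ 0 && PySem.List.pyGetD [r0 + i, c1 - 1] 1 0 ≥ 0) &&
             (PySem.List.pyGetD [r0 + i, c1 - 1] 0 0 < row_size && PySem.List.pyGetD [r0 + i, c1 - 1] 1 0 < column_size))
        then false else acc) true) = false := by
      rw [Bool.eq_false_iff]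
      intro h; exact hbp (hvalid_iff.mp h)
    rw [hv]
    have hguard : (decide (0 ≤ r0) && decide (r0 + size ≤ row_size) && decide (0 ≤ c1 - 1) &&
        decide (c1 - 1 < column_size)) = false := by
      rw [Bool.eq_false_iff]
      intro h
      simp only [Bool.and_eq_true, decide_eq_true_eq] at h
      exact hbp ⟨h.1.1.1, by omega, h.1.2, h.2⟩
    rw [hguard]
    simp
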